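-- pv_equiv track=rewrite | github.com/NicolasCorneli/Laboratorio-de-Algoritimos-II | Matrizes/Exercicios01.py | organizator
-- ===== SOURCE A (Python) =====
-- def organizator(my_list):
--     uniq_list = []
--     duplicated_list = []
--     for item in my_list:
--         if item not in uniq_list:
--             uniq_list.append(item)
--         else:
--             duplicated_list.append(item)
--     return uniq_list, duplicated_list
-- ===== SOURCE B (Python) =====
-- def organizator(my_list):
--     # Build-then-derive decomposition: first the order-preserving deduplication,
--     # then obtain the duplicates by removing one (first) occurrence of each
--     # unique element from a copy of the input; the survivors are exactly the
--     # non-first occurrences in original order. Does not mutate the argument.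
--     uniq_list = []
--     for item in my_list:
--         if item not in uniq_list:
--             uniq_list.append(item)
--     duplicated_list = list(my_list)
--     for u in uniq_list:
--         duplicated_list.remove(u)
--     return uniq_list, duplicated_list
-- ===== Notes on version B (the rewrite author's own statement) =====
-- stated objective: alternative
-- what changed: Replaces A's single interleaved loop with a build-then-derive decomposition: one pass builds the order-preserving deduplication, then the duplicates are obtained by removing one occurrence of each unique element from a copy of the input.
import Mathlib
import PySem

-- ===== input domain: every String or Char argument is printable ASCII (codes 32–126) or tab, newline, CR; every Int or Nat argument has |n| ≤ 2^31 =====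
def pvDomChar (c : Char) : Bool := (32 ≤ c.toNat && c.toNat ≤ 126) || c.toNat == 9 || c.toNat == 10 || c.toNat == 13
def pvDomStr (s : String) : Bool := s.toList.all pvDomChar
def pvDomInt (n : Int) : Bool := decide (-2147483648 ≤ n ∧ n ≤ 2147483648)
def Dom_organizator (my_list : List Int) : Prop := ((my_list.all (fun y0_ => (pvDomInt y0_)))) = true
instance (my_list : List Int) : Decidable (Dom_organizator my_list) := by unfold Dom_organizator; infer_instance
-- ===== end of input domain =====

-- B replaces A's single interleaved loop by build-then-derive: dedup first, then the duplicates by removing each unique element once from a copy; same cost, different decomposition.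

-- ===== PORT A =====
def organizator (my_list : List Int) : List Int × List Int :=
  my_list.foldl
    (fun st item =>
      if item ∉ st.1 then (st.1 ++ [item], st.2) else (st.1, st.2 ++ [item]))
    ([], [])

-- ===== PORT B =====
def organizator_alt (my_list : List Int) : List Int × List Int :=
  let uniq_list := my_list.foldl (fun u item => if item ∉ u then u ++ [item] else u) []
  -- Source B's `duplicated_list.remove(u)`: u is always present (first occurrence not yet
  -- removed), so Python never raises here; the `.getD r` branch is unreachable.
  let duplicated_list :=
    uniq_list.foldl (fun r u => (PySem.List.remove? r u).getD r) my_list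
  (uniq_list, duplicated_list)

-- ===== PRECONDITION & SPEC =====
def Spec_organizator (my_list : List Int) (out : List Int × List Int) : Prop := out = organizator_alt my_list
instance (my_list : List Int) (out : List Int × List Int) : Decidable (Spec_organizator my_list out) := by unfold Spec_organizator; infer_instance

-- ===== CLAIM (what is proved, stated in full; the proofs are below) =====
def Claim_equal_organizator : Prop := ∀ (my_list : List Int), Dom_organizator my_list → Spec_organizator my_list (organizator my_list)

-- ===== LEMMAS AND PROOFS =====

-- Proof-side reference: one recursion producing both components, carrying the seen prefix.
def orgGo (seen : List Int) : List Int → List Int × List Int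
  | [] => ([], [])
  | x :: xs =>
    let p := orgGo (seen ++ [x]) xs
    if x ∈ seen then (p.1, x :: p.2) else (x :: p.1, p.2)

theorem organizator_fold_go (l : List Int) : ∀ (u d seen : List Int),
    (∀ x : Int, x ∈ u ↔ x ∈ seen) →
    l.foldl
      (fun st item =>
        if item ∉ st.1 then (st.1 ++ [item], st.2) else (st.1, st.2 ++ [item]))
      (u, d)
    = (u ++ (orgGo seen l).1, d ++ (orgGo seen l).2) := by
  induction l with
  | nil => intro u d seen _; simp [orgGo]
  | cons x xs ih =>
    intro u d seen h
    by_cases hx : x ∈ seen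
    · have hxu : x ∈ u := (h x).mpr hx
      have h' : ∀ y : Int, y ∈ u ↔ y ∈ seen ++ [x] := by
        intro y; simp [h y]; intro hy; subst hy; exact hx
      rw [List.foldl_cons, if_neg (not_not_intro hxu)]
      rw [ih u (d ++ [x]) (seen ++ [x]) h']
      simp [orgGo, hx]
    · have hxu : x ∉ u := fun hc => hx ((h x).mp hc)
      have h' : ∀ y : Int, y ∈ u ++ [x] ↔ y ∈ seen ++ [x] := by
        intro y; simp [h y]
      rw [List.foldl_cons, if_pos hxu]
      rw [ih (u ++ [x]) d (seen ++ [x]) h']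
      simp [orgGo, hx]

theorem uniq_fold_go (l : List Int) : ∀ (u seen : List Int),
    (∀ x : Int, x ∈ u ↔ x ∈ seen) →
    l.foldl (fun u item => if item ∉ u then u ++ [item] else u) u
      = u ++ (orgGo seen l).1 := by
  induction l with
  | nil => intro u seen _; simp [orgGo]
  | cons x xs ih =>
    intro u seen h
    by_cases hx : x ∈ seen
    · have hxu : x ∈ u := (h x).mpr hx
      have h' : ∀ y : Int, y ∈ u ↔ y ∈ seen ++ [x] := by
        intro y; simp [h y]; intro hy; subst hy; exact hx
      rw [List.foldl_cons, if_neg (not_not_intro hxu), ih u (seen ++ [x]) h']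
      simp [orgGo, hx]
    · have hxu : x ∉ u := fun hc => hx ((h x).mp hc)
      have h' : ∀ y : Int, y ∈ u ++ [x] ↔ y ∈ seen ++ [x] := by
        intro y; simp [h y]
      rw [List.foldl_cons, if_pos hxu, ih (u ++ [x]) (seen ++ [x]) h']
      simp [orgGo, hx]

-- Removing a value different from the head keeps the head.
theorem removeStep_cons_of_ne (x u : Int) (xs : List Int) (h : u ≠ x) :
    (PySem.List.remove? (x :: xs) u).getD (x :: xs)
      = x :: (PySem.List.remove? xs u).getD xs := by
  rw [PySem.List.remove?_cons_of_ne xs (fun e => h e.symm)]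
  cases PySem.List.remove? xs u <;> simp

-- Sequentially removing values all different from the head keeps the head.
theorem foldl_remove_cons (U : List Int) : ∀ (x : Int) (xs : List Int),
    (∀ u ∈ U, u ≠ x) →
    U.foldl (fun r u => (PySem.List.remove? r u).getD r) (x :: xs)
      = x :: U.foldl (fun r u => (PySem.List.remove? r u).getD r) xs := by
  induction U with
  | nil => intro x xs _; simp
  | cons u us ih =>
    intro x xs h
    rw [List.foldl_cons, List.foldl_cons,
      removeStep_cons_of_ne x u xs (h u (by simp))]
    exact ih x _ (fun v hv => h v (by simp [hv]))

-- The elements of the first-occurrence list are exactly those not yet seen.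
theorem orgGo_fst_not_mem_seen (l : List Int) : ∀ (seen : List Int) (u : Int),
    u ∈ (orgGo seen l).1 → u ∉ seen := by
  induction l with
  | nil => intro seen u h; simp [orgGo] at h
  | cons x xs ih =>
    intro seen u h
    by_cases hx : x ∈ seen
    · simp only [orgGo, if_pos hx] at h
      intro hu
      exact ih (seen ++ [x]) u h (by simp [hu])
    · simp only [orgGo, if_neg hx, List.mem_cons] at h
      rcases h with rfl | h
      · exact hx
      · intro hu
        exact ih (seen ++ [x]) u h (by simp [hu])

-- Removing the first occurrences from the list leaves exactly the duplicates.
theorem remove_go (l : List Int) : ∀ (seen : List Int),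
    (orgGo seen l).1.foldl (fun r u => (PySem.List.remove? r u).getD r) l
      = (orgGo seen l).2 := by
  induction l with
  | nil => intro seen; simp [orgGo]
  | cons x xs ih =>
    intro seen
    by_cases hx : x ∈ seen
    · simp only [orgGo, if_pos hx]
      rw [foldl_remove_cons _ x xs
        (fun u hu hux => orgGo_fst_not_mem_seen xs (seen ++ [x]) u hu (by simp [hux]))]
      rw [ih (seen ++ [x])]
    · simp only [orgGo, if_neg hx, List.foldl_cons,
        PySem.List.remove?_cons_self, Option.getD_some]
      exact ih (seen ++ [x])

-- ===== VERDICT (by name: the statement is the Claim_ definition above) =====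
theorem organizator_spec : Claim_equal_organizator := by
  intro l _
  show organizator l = organizator_alt l
  unfold organizator organizator_alt
  rw [organizator_fold_go l [] [] [] (by simp)]
  rw [uniq_fold_go l [] [] (by simp)]
  simp [remove_go l []]
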